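-- pv_equiv track=rewrite | github.com/kodychik/CascaAI | build_up.py | group_token_predictions
-- ===== SOURCE A (Python) =====
-- def group_token_predictions(tokens, predicted_labels, label_map):
--     """
--     Groups contiguous tokens that have the same predicted label.
--
--     Args:
--         tokens (List[str]): The list of tokens.
--         predicted_labels (List[int]): The list of predicted label IDs.
--         label_map (dict): A mapping from label IDs to label names.
--
--     Returns:
--         grouped (List[tuple]): A list of tuples (label, text) where contiguous tokens with the same label are merged.
--     """
--     if not tokens or not predicted_labels:
--         return []
--
--     current_label = label_map.get(predicted_labels[0], "O")
--     current_tokens = [tokens[0]]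
--     grouped = []
--
--     for token, label in zip(tokens[1:], predicted_labels[1:]):
--         label_text = label_map.get(label, "O")
--         if label_text == current_label:
--             current_tokens.append(token)
--         else:
--             grouped.append((current_label, " ".join(current_tokens)))
--             current_label = label_text
--             current_tokens = [token]
--
--     grouped.append((current_label, " ".join(current_tokens)))
--     return grouped
-- ===== SOURCE B (Python) =====
-- def group_token_predictions(tokens, predicted_labels, label_map):
--     # Run-extraction: map pairs to (token, label_text) once, then scan runs
--     # with two cursors i (run start) and j (first index past the run).
--     pairs = [(t, label_map.get(l, "O")) for t, l in zip(tokens, predicted_labels)]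
--     out = []
--     i, n = 0, len(pairs)
--     while i < n:
--         lab = pairs[i][1]
--         j = i + 1
--         while j < n and pairs[j][1] == lab:
--             j += 1
--         out.append((lab, " ".join(t for t, _ in pairs[i:j])))
--         i = j
--     return out
-- ===== Notes on version B (the rewrite author's own statement) =====
-- stated objective: alternative
-- what changed: Replaces A's current_label/current_tokens accumulator with flush-on-change by a run-extraction scan: map all pairs to (token, label_text) once, then scan maximal same-label runs with two cursors (run start and run end) and emit one (label, joined text) per run.
import Mathlib
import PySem

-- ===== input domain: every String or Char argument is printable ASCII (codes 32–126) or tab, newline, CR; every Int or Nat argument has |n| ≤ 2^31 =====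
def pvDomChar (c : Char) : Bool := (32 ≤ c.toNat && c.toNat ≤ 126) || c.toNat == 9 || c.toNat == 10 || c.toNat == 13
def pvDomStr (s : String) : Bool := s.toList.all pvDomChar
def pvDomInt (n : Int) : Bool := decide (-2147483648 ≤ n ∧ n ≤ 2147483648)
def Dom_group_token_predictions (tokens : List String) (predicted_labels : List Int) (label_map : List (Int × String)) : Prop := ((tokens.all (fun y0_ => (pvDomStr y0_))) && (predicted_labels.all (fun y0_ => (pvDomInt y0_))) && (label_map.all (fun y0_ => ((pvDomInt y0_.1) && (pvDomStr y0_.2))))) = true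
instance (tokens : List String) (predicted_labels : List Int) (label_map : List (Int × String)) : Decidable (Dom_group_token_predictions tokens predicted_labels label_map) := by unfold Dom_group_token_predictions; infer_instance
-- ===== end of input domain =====

-- B replaces A's accumulator-with-flush loop by a run-extraction scan over the precomputed
-- (token, label_text) pairs (alternative decomposition, same cost). Return values only; neither mutates.

-- ===== PORT A =====
-- A's for-loop over zip(tokens[1:], labels[1:]) with state (current_label, current_tokens, grouped)
def aLoop (m : PySem.Dict Int String) : List (String × Int) → String → List String → List (String × String) → List (String × String)
  | [], cur, toks, grouped => grouped ++ [(cur, PySem.Str.join " " toks)]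
  | (t, l) :: rest, cur, toks, grouped =>
    let lt := m.getD l "O"
    if lt == cur then aLoop m rest cur (toks ++ [t]) grouped
    else aLoop m rest lt [t] (grouped ++ [(cur, PySem.Str.join " " toks)])

def group_token_predictions (tokens : List String) (predicted_labels : List Int) (label_map : List (Int × String)) : List (String × String) :=
  match tokens, predicted_labels with
  | [], _ => []
  | _, [] => []
  | t :: ts, l :: ls =>
    let m := PySem.Dict.ofList label_map
    aLoop m (List.zip ts ls) (m.getD l "O") [t] []

-- ===== PORT B =====
-- the cursor loop over pairs: run start i = recursing on the suffix; the inner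
-- while advancing j over the run is takeWhile / dropWhile of the same-label prefix of the tail
def bGroup : List (String × String) → List (String × String)
  | [] => []
  | (t, lab) :: rest =>
    (lab, PySem.Str.join " " (t :: (rest.takeWhile (fun p => p.2 == lab)).map Prod.fst))
      :: bGroup (rest.dropWhile (fun p => p.2 == lab))
termination_by l => l.length
decreasing_by
  simp only [List.length_cons]
  exact Nat.lt_succ_of_le (List.length_dropWhile_le _ _)

def group_token_predictions_alt (tokens : List String) (predicted_labels : List Int) (label_map : List (Int × String)) : List (String × String) :=
  let m := PySem.Dict.ofList label_map
  bGroup ((List.zip tokens predicted_labels).map (fun p => (p.1, m.getD p.2 "O")))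

-- ===== PRECONDITION & SPEC =====
def Spec_group_token_predictions (tokens : List String) (predicted_labels : List Int) (label_map : List (Int × String)) (out : List (String × String)) : Prop := out = group_token_predictions_alt tokens predicted_labels label_map
instance (tokens : List String) (predicted_labels : List Int) (label_map : List (Int × String)) (out : List (String × String)) : Decidable (Spec_group_token_predictions tokens predicted_labels label_map out) := by unfold Spec_group_token_predictions; infer_instance

-- ===== CLAIM (what is proved, stated in full; the proofs are below) =====
def Claim_equal_group_token_predictions : Prop := ∀ (tokens : List String) (predicted_labels : List Int) (label_map : List (Int × String)), Dom_group_token_predictions tokens predicted_labels label_map → Spec_group_token_predictions tokens predicted_labels label_map (group_token_predictions tokens predicted_labels label_map)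

-- ===== LEMMAS AND PROOFS =====

-- proof helper: bGroup with an open current group (cur, toks) at the front
def bGroupFrom (cur : String) (toks : List String) (ps : List (String × String)) : List (String × String) :=
  (cur, PySem.Str.join " " (toks ++ (ps.takeWhile (fun p => p.2 == cur)).map Prod.fst))
    :: bGroup (ps.dropWhile (fun p => p.2 == cur))

theorem bGroup_cons (t : String) (lab : String) (rest : List (String × String)) :
    bGroup ((t, lab) :: rest) = bGroupFrom lab [t] rest := by
  rw [bGroup, bGroupFrom]
  simp

theorem aLoop_eq (m : PySem.Dict Int String) (pairs : List (String × Int)) :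
    ∀ (cur : String) (toks : List String) (grouped : List (String × String)),
      aLoop m pairs cur toks grouped
        = grouped ++ bGroupFrom cur toks (pairs.map (fun p => (p.1, m.getD p.2 "O"))) := by
  induction pairs with
  | nil =>
    intro cur toks grouped
    simp [aLoop, bGroupFrom, bGroup]
  | cons p rest ih =>
    intro cur toks grouped
    obtain ⟨t, l⟩ := p
    by_cases h : m.getD l "O" = cur
    · rw [aLoop]
      simp only [h, beq_self_eq_true, if_true, ih]
      rw [bGroupFrom, bGroupFrom]
      simp [h]
    · rw [aLoop]
      have hb : (m.getD l "O" == cur) = false := by simp [h]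
      simp only [hb, Bool.false_eq_true, if_false, ih]
      rw [bGroupFrom, bGroupFrom]
      simp only [List.map_cons, List.takeWhile, List.dropWhile, hb]
      rw [bGroup_cons, bGroupFrom]
      simp

-- ===== VERDICT (by name: the statement is the Claim_ definition above) =====
theorem group_token_predictions_spec : Claim_equal_group_token_predictions := by
  intro tokens predicted_labels label_map _
  unfold Spec_group_token_predictions group_token_predictions group_token_predictions_alt
  match tokens, predicted_labels with
  | [], _ => simp [bGroup]
  | _ :: _, [] => simp [bGroup]
  | t :: ts, l :: ls =>
    simp only [List.zip_cons_cons, List.map_cons]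
    rw [aLoop_eq, bGroup_cons]
    simp
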